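-- pv_equiv track=rewrite | github.com/Mahad-Saffi/Amazon-Research-Project | api/services/keyword_root_analyzer.py | _rank_roots
-- ===== SOURCE A (Python) =====
-- from typing import List, Dict, Any, Set, Tuple
--
-- def _rank_roots(
--
--     root_stats: List[Dict[str, Any]]
-- ) -> List[Dict[str, Any]]:
--     """
--     Rank roots by importance
--
--     Ranking criteria:
--     1. Design-specific roots get priority
--     2. Total search volume
--     3. Number of keywords
--     """
--     # Separate design-specific and regular roots
--     design_roots = [r for r in root_stats if r['is_design_specific']]
--     regular_roots = [r for r in root_stats if not r['is_design_specific']]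
--
--     # Sort design-specific by total search volume
--     design_roots.sort(key=lambda x: x['total_search_volume'], reverse=True)
--
--     # Sort regular by total search volume
--     regular_roots.sort(key=lambda x: x['total_search_volume'], reverse=True)
--
--     # Combine: design-specific first, then regular
--     ranked = design_roots + regular_roots
--
--     # Add rank number
--     for i, root in enumerate(ranked, 1):
--         root['rank'] = i
--
--     return ranked
-- ===== SOURCE B (Python) =====
-- def _rank_roots(root_stats):
--     """Rank roots by repeated selection: pull out the best remaining root
--     (design-specific beats regular, then higher total search volume; first
--     occurrence wins ties) and assign its rank immediately."""
--     remaining = list(root_stats)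
--     ranked = []
--     rank = 1
--     while remaining:
--         # max with key returns the FIRST maximal index, matching the
--         # stability of A's sorts on ties
--         best = max(range(len(remaining)),
--                    key=lambda j: (bool(remaining[j]['is_design_specific']),
--                                   remaining[j]['total_search_volume']))
--         root = remaining.pop(best)
--         root['rank'] = rank
--         ranked.append(root)
--         rank += 1
--     return ranked
-- ===== Notes on version B (the rewrite author's own statement) =====
-- stated objective: alternative
-- what changed: The partition + two library sorts + concatenation is replaced by a selection loop: repeatedly take the first best remaining root (design flag, then volume; max over indices) with pop, assigning ranks as the output is built.
import Mathlib
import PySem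

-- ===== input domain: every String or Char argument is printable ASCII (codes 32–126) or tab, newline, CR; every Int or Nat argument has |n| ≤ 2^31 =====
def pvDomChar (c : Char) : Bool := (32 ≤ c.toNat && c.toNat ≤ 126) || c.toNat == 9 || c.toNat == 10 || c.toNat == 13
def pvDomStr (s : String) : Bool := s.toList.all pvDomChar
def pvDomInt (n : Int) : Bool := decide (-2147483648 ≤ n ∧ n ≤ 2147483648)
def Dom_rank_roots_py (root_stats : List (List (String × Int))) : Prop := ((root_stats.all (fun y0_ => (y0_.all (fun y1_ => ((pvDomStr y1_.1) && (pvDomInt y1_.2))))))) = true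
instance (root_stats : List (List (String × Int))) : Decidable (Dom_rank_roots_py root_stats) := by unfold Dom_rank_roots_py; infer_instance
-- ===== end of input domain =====

-- B replaces A's partition + two library sorts + concatenation by a selection loop: repeatedly
-- pop the first best remaining root (design flag, then volume) and assign its rank immediately.
-- Equivalence is about the RETURN value only (both Pythons set root['rank'] on the same dicts).

-- ===== PORT A =====
-- dict lookup d[k]: first matching pair (Pre_ guarantees the key is present)
def pvGetKey (d : List (String × Int)) (k : String) : Int :=
  ((d.find? (fun p => p.1 == k)).getD ("", 0)).2

-- d['rank'] = v : overwrite the first 'rank' pair in place, else append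
def pvSetRank (d : List (String × Int)) (v : Int) : List (String × Int) :=
  match d with
  | [] => [("rank", v)]
  | p :: t => if p.1 == "rank" then ("rank", v) :: t else p :: pvSetRank t v

-- for i, root in enumerate(ranked, 1): root['rank'] = i
def pvAddRanks (i : Int) (ds : List (List (String × Int))) : List (List (String × Int)) :=
  match ds with
  | [] => []
  | d :: t => pvSetRank d i :: pvAddRanks (i + 1) t

def rank_roots_py (root_stats : List (List (String × Int))) : List (List (String × Int)) :=
  let design_roots := root_stats.filter (fun r => pvGetKey r "is_design_specific" != 0)
  let regular_roots := root_stats.filter (fun r => pvGetKey r "is_design_specific" == 0)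
  let design_roots := PySem.List.sorted design_roots (fun x => pvGetKey x "total_search_volume") true
  let regular_roots := PySem.List.sorted regular_roots (fun x => pvGetKey x "total_search_volume") true
  let ranked := design_roots ++ regular_roots
  pvAddRanks 1 ranked

-- ===== PORT B =====
-- while remaining: best = max(range(len(remaining)), key=...); root = remaining.pop(best);
--                  root['rank'] = rank; ranked.append(root); rank += 1
-- (bool(flag) ported as the int 0/1 it compares as inside the tuple key;
--  max(..., key=tuple) is PySem.List.max2?, the FIRST maximal element)
def pvSelLoop (rank : Int) (remaining : List (List (String × Int))) : List (List (String × Int)) :=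
  match _hr : remaining with
  | [] => []
  | _ :: _ =>
    let best := (PySem.List.max2? (PySem.List.pyRange 0 (remaining.length : Int) 1)
        (fun j => if pvGetKey (PySem.List.pyGetD remaining j []) "is_design_specific" == 0 then (0 : Int) else 1)
        (fun j => pvGetKey (PySem.List.pyGetD remaining j []) "total_search_volume")).getD 0
    match hp : PySem.List.pop? remaining best with
    | none => []   -- unreachable: best is always a valid index (totality guard only)
    | some (root, rest) => pvSetRank root rank :: pvSelLoop (rank + 1) rest
termination_by remaining.length
decreasing_by
  have := PySem.List.length_of_pop?_eq_some remaining hp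
  simp_all

def rank_roots_py_alt (root_stats : List (List (String × Int))) : List (List (String × Int)) :=
  pvSelLoop 1 root_stats

-- ===== PRECONDITION & SPEC =====
-- Pre_ excludes exactly the dicts missing one of the two keys, where Python A raises KeyError.
def Pre_rank_roots_py (root_stats : List (List (String × Int))) : Prop :=
  ∀ d ∈ root_stats, (d.any (fun p => p.1 == "is_design_specific")) = true ∧
                    (d.any (fun p => p.1 == "total_search_volume")) = true
instance (root_stats : List (List (String × Int))) : Decidable (Pre_rank_roots_py root_stats) := by
  unfold Pre_rank_roots_py; infer_instance

def pvWitness_rank_roots_py : (List (List (String × Int))) :=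
  [[("is_design_specific", 1), ("total_search_volume", 5)],
   [("is_design_specific", 0), ("total_search_volume", 9)]]

def Spec_rank_roots_py (root_stats : List (List (String × Int))) (out : List (List (String × Int))) : Prop := out = rank_roots_py_alt root_stats
instance (root_stats : List (List (String × Int))) (out : List (List (String × Int))) : Decidable (Spec_rank_roots_py root_stats out) := by unfold Spec_rank_roots_py; infer_instance

-- ===== CLAIM (what is proved, stated in full; the proofs are below) =====
def Claim_equal_rank_roots_py : Prop := ∀ (root_stats : List (List (String × Int))), Dom_rank_roots_py root_stats → Pre_rank_roots_py root_stats → Spec_rank_roots_py root_stats (rank_roots_py root_stats)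

-- ===== LEMMAS AND PROOFS =====

-- the element-wise keys and the strict lexicographic 'greater' both ports compare by
def pvK1 (r : List (String × Int)) : Int :=
  if pvGetKey r "is_design_specific" == 0 then 0 else 1
def pvK2 (r : List (String × Int)) : Int := pvGetKey r "total_search_volume"
def pvGt (a b : List (String × Int)) : Bool :=
  decide (pvK1 b < pvK1 a) || (!decide (pvK1 a < pvK1 b) && decide (pvK2 b < pvK2 a))

-- (index, element) of the FIRST maximal element of x :: t under a scan keeping the current best
def pvFm (x : List (String × Int)) (t : List (List (String × Int))) :
    Nat × List (String × Int) :=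
  match t with
  | [] => (0, x)
  | y :: t' =>
      if pvGt y x then ((pvFm y t').1 + 1, (pvFm y t').2)
      else (if (pvFm x t').1 = 0 then 0 else (pvFm x t').1 + 1, (pvFm x t').2)

theorem pvFm_fst_le (x : List (String × Int)) (t : List (List (String × Int))) :
    (pvFm x t).1 ≤ t.length := by
  induction t generalizing x with
  | nil => simp [pvFm]
  | cons y t' ih =>
      simp only [pvFm]
      split
      · simpa using Nat.succ_le_succ (ih y)
      · split
        · simp
        · simpa using Nat.succ_le_succ (ih x)

theorem pvFm_snd_of_fst_zero (x : List (String × Int)) (t : List (List (String × Int))) :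
    (pvFm x t).1 = 0 → (pvFm x t).2 = x := by
  induction t generalizing x with
  | nil => simp [pvFm]
  | cons y t' ih =>
      simp only [pvFm]
      split
      · simp
      · split
        · intro _; exact ih x (by omega)
        · simp

theorem pvFm_snd_getD (x d : List (String × Int)) (t : List (List (String × Int))) :
    (x :: t).getD (pvFm x t).1 d = (pvFm x t).2 := by
  induction t generalizing x with
  | nil => simp [pvFm]
  | cons y t' ih =>
      simp only [pvFm]
      split
      · simpa using ih y
      · split
        · rename_i h0
          simp [pvFm_snd_of_fst_zero x t' h0]
        · rename_i h0
          have := ih x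
          rcases hk : (pvFm x t').1 with _ | k
          · omega
          · rw [hk] at this
            simpa using this

theorem pvFm_snoc (x z : List (String × Int)) (t : List (List (String × Int))) :
    pvFm x (t ++ [z]) =
      if pvGt z (pvFm x t).2 then (t.length + 1, z) else pvFm x t := by
  induction t generalizing x with
  | nil => simp [pvFm]
  | cons y t' ih =>
      simp only [List.cons_append, pvFm, ih]
      by_cases hyx : pvGt y x = true
      · simp only [hyx, if_true]
        by_cases hz : pvGt z (pvFm y t').2 = true
        · simp [hz]
        · simp [hz]
      · simp only [Bool.not_eq_true] at hyx
        simp only [hyx, if_false, Bool.false_eq_true]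
        by_cases hz : pvGt z (pvFm x t').2 = true
        · have h1 : (pvFm x t').1 ≤ t'.length := pvFm_fst_le x t'
          simp [hz]
        · simp [hz]

-- selection sort: pull out the first maximal element, recurse on the rest
def pvSel (xs : List (List (String × Int))) : List (List (String × Int)) :=
  match xs with
  | [] => []
  | x :: t => (pvFm x t).2 :: pvSel ((x :: t).eraseIdx (pvFm x t).1)
termination_by xs.length
decreasing_by
  have := pvFm_fst_le x t
  simp only [List.length_eraseIdx, List.length_cons]
  split <;> omega

theorem pvSel_nil : pvSel [] = [] := by rw [pvSel.eq_def]

theorem pvSel_cons (x : List (String × Int)) (t : List (List (String × Int))) :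
    pvSel (x :: t) = (pvFm x t).2 :: pvSel ((x :: t).eraseIdx (pvFm x t).1) := by
  rw [pvSel.eq_def]

theorem insertBy_nil (before : List (String × Int) → List (String × Int) → Bool)
    (x : List (String × Int)) : PySem.List.insertBy before x [] = [x] := rfl

theorem insertBy_cons (before : List (String × Int) → List (String × Int) → Bool)
    (x y : List (String × Int)) (ys : List (List (String × Int))) :
    PySem.List.insertBy before x (y :: ys) =
      if before x y then x :: y :: ys else y :: PySem.List.insertBy before x ys := rfl

-- the insertion-sort foldl (= PySem's stable sort) of both ports' comparator
def pvIns (xs : List (List (String × Int))) : List (List (String × Int)) :=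
  List.foldl (fun acc x => PySem.List.insertBy pvGt x acc) [] xs

theorem pvIns_snoc (xs : List (List (String × Int))) (x : List (String × Int)) :
    pvIns (xs ++ [x]) = PySem.List.insertBy pvGt x (pvIns xs) := by
  simp [pvIns, List.foldl_append]

-- how the selection sort absorbs one more trailing element
theorem pvSel_snoc (y z : List (String × Int)) (t : List (List (String × Int))) :
    pvSel ((y :: t) ++ [z])
      = if pvGt z (pvFm y t).2 then z :: pvSel (y :: t)
        else (pvFm y t).2 :: pvSel ((y :: t).eraseIdx (pvFm y t).1 ++ [z]) := by
  rw [List.cons_append, pvSel_cons, pvFm_snoc]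
  by_cases hz : pvGt z (pvFm y t).2 = true
  · rw [if_pos hz, if_pos hz]
    have he : (y :: (t ++ [z])).eraseIdx (t.length + 1) = y :: t := by
      rw [show y :: (t ++ [z]) = (y :: t) ++ [z] from rfl,
        List.eraseIdx_append_of_length_le (by simp)]
      simp
    rw [he]
  · rw [if_neg hz, if_neg hz]
    have hlt : (pvFm y t).1 < (y :: t).length := by
      have := pvFm_fst_le y t; simp; omega
    rw [show y :: (t ++ [z]) = (y :: t) ++ [z] from rfl,
      List.eraseIdx_append_of_lt_length hlt]

-- the stable insertion sort obeys the selection recurrence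
theorem pvIns_eq_pvSel : ∀ (n : Nat) (xs : List (List (String × Int))),
    xs.length = n → pvIns xs = pvSel xs := by
  intro n
  induction n using Nat.strong_induction_on with
  | _ n ih =>
    intro xs hn
    rcases List.eq_nil_or_concat xs with rfl | ⟨ys, z, rfl⟩
    · rw [pvSel_nil]; rfl
    · rw [List.concat_eq_append] at hn ⊢
      match ys with
      | [] =>
        simp only [List.nil_append]
        rw [pvSel_cons]
        simp only [pvFm, List.eraseIdx, pvSel_nil]
        rfl
      | y :: t =>
        have hlen : (y :: t).length < n := by simp at hn ⊢; omega
        have ihys : pvIns (y :: t) = pvSel (y :: t) := ih _ hlen _ rfl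
        have hfle : (pvFm y t).1 ≤ t.length := pvFm_fst_le y t
        have herase : ((y :: t).eraseIdx (pvFm y t).1).length < n := by
          simp only [List.length_eraseIdx, List.length_cons] at *
          split <;> omega
        have iher : pvIns ((y :: t).eraseIdx (pvFm y t).1)
            = pvSel ((y :: t).eraseIdx (pvFm y t).1) := ih _ herase _ rfl
        rw [pvIns_snoc, ihys, pvSel_snoc]
        conv_lhs => rw [pvSel_cons]
        rw [insertBy_cons]
        by_cases hz : pvGt z (pvFm y t).2 = true
        · rw [if_pos hz, if_pos hz]
          conv_rhs => rw [pvSel_cons]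
        · rw [if_neg hz, if_neg hz]
          congr 1
          rw [← iher, ← pvIns_snoc]
          exact ih _ (by
            simp only [List.length_append, List.length_eraseIdx,
              List.length_cons] at *
            split <;> omega) _ rfl

-- ---- bridge: Python's max(range(len(xs)), key=…) computes pvFm's index ----

-- the foldl step of PySem.List.max2? over index keys
def pvStep (xs : List (List (String × Int))) (acc : Option Int) (j : Int) : Option Int :=
  match acc with
  | none => some j
  | some m =>
      if (decide (pvK1 (PySem.List.pyGetD xs m []) < pvK1 (PySem.List.pyGetD xs j []))
          || !decide (pvK1 (PySem.List.pyGetD xs j []) < pvK1 (PySem.List.pyGetD xs m []))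
             && decide (pvK2 (PySem.List.pyGetD xs m []) < pvK2 (PySem.List.pyGetD xs j []))) = true
      then some j else some m

theorem pvStep_gt (xs : List (List (String × Int))) (m j : Int) :
    pvStep xs (some m) j =
      if pvGt (PySem.List.pyGetD xs j []) (PySem.List.pyGetD xs m []) then some j else some m := by
  simp [pvStep, pvGt]

-- scan invariant: folding pvStep over the index range [off, xs.length) starting from best
-- index i0 (whose element is c, the current best) lands on pvFm's first-max position
theorem foldl_pvStep_fm (u : List (List (String × Int))) :
    ∀ (xs : List (List (String × Int))) (off i0 : Nat) (c : List (String × Int)),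
    List.drop off xs = u → i0 < xs.length → xs.getD i0 [] = c →
    List.foldl (pvStep xs) (some (i0 : Int)) (PySem.List.pyRange (off : Int) (xs.length : Int) 1)
      = some (((if (pvFm c u).1 = 0 then i0 else off + (pvFm c u).1 - 1 : Nat)) : Int) := by
  induction u with
  | nil =>
      intro xs off i0 c hdrop hi0 hc
      have hoff : xs.length ≤ off := by
        by_contra h
        have := List.drop_eq_nil_iff.mp hdrop
        omega
      have : PySem.List.pyRange (off : Int) (xs.length : Int) 1 = [] := by
        have : ∀ x, x ∉ PySem.List.pyRange (off : Int) (xs.length : Int) 1 := by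
          intro x hx
          rw [PySem.List.mem_pyRange_one] at hx
          omega
        exact List.eq_nil_iff_forall_not_mem.mpr this
      simp [this, pvFm]
  | cons y u' ih =>
      intro xs off i0 c hdrop hi0 hc
      have hofflt : off < xs.length := by
        by_contra h
        have : List.drop off xs = [] := List.drop_eq_nil_iff.mpr (by omega)
        simp [this] at hdrop
      have hy : xs.getD off [] = y := by
        have : xs.getD off [] = (List.drop off xs).getD 0 [] := by
          simp [List.getD, List.getElem?_drop]
        rw [this, hdrop]; rfl
      rw [PySem.List.pyRange_one_cons (by exact_mod_cast hofflt)]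
      rw [List.foldl_cons, pvStep_gt]
      rw [PySem.List.pyGetD_natCast, PySem.List.pyGetD_natCast, hy, hc]
      have hdrop' : List.drop (off + 1) xs = u' := by
        rw [← List.drop_drop, hdrop]
        rfl
      by_cases hgt : pvGt y c = true
      · rw [if_pos hgt]
        have hrec := ih xs (off + 1) off y hdrop' hofflt hy
        push_cast at hrec
        rw [hrec]
        simp only [pvFm, hgt, if_true]
        congr 1
        split_ifs <;> first | exact (show False by assumption).elim | omega
      · rw [if_neg hgt]
        have hrec := ih xs (off + 1) i0 c hdrop' hi0 hc
        push_cast at hrec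
        rw [hrec]
        simp only [pvFm, hgt, Bool.false_eq_true, if_false]
        congr 1
        split_ifs <;> first | exact (show False by assumption).elim | omega

-- B's best = max(range(len(xs)), key=…) is pvFm's index
theorem max2?_range_eq_fm (x : List (String × Int)) (t : List (List (String × Int))) :
    (PySem.List.max2? (PySem.List.pyRange 0 ((x :: t).length : Int) 1)
        (fun j => if pvGetKey (PySem.List.pyGetD (x :: t) j []) "is_design_specific" == 0 then (0 : Int) else 1)
        (fun j => pvGetKey (PySem.List.pyGetD (x :: t) j []) "total_search_volume")).getD 0
      = ((pvFm x t).1 : Int) := by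
  have hkey : (fun j => if pvGetKey (PySem.List.pyGetD (x :: t) j []) "is_design_specific" == 0 then (0 : Int) else 1)
      = (fun j => pvK1 (PySem.List.pyGetD (x :: t) j [])) := rfl
  have hkey2 : (fun j => pvGetKey (PySem.List.pyGetD (x :: t) j []) "total_search_volume")
      = (fun j => pvK2 (PySem.List.pyGetD (x :: t) j [])) := rfl
  rw [hkey, hkey2]
  have hmax : PySem.List.max2? (PySem.List.pyRange 0 ((x :: t).length : Int) 1)
        (fun j => pvK1 (PySem.List.pyGetD (x :: t) j []))
        (fun j => pvK2 (PySem.List.pyGetD (x :: t) j []))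
      = List.foldl (pvStep (x :: t)) none (PySem.List.pyRange 0 ((x :: t).length : Int) 1) := by
    unfold PySem.List.max2?
    congr 1
    funext acc j
    cases acc <;> rfl
  rw [hmax]
  have h01 : (0 : Int) < ((x :: t).length : Int) := by
    have : 0 < (x :: t).length := Nat.succ_pos _
    exact_mod_cast this
  rw [PySem.List.pyRange_one_cons h01]
  have hstep : pvStep (x :: t) none 0 = some 0 := rfl
  rw [List.foldl_cons, hstep]
  have h0 : (some (0 : Int)) = some ((0 : Nat) : Int) := rfl
  have := foldl_pvStep_fm t (x :: t) 1 0 x (by simp) (Nat.succ_pos _) rfl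
  push_cast at this ⊢
  rw [h0] at *
  rw [this]
  simp only [Option.getD_some]
  split_ifs <;> omega

-- B's loop is: rank the selection sort
theorem pvSelLoop_eq_addRanks : ∀ (n : Nat) (xs : List (List (String × Int))) (rank : Int),
    xs.length = n → pvSelLoop rank xs = pvAddRanks rank (pvSel xs) := by
  intro n
  induction n using Nat.strong_induction_on with
  | _ n ih =>
    intro xs rank hn
    match xs with
    | [] => rw [pvSelLoop, pvSel_nil]; rfl
    | x :: t =>
      rw [pvSelLoop]
      have hfle : (pvFm x t).1 ≤ t.length := pvFm_fst_le x t
      have hpop : PySem.List.pop? (x :: t) ((pvFm x t).1 : Int)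
          = some ((pvFm x t).2, (x :: t).eraseIdx (pvFm x t).1) := by
        have hidx : PySem.List.pyIdx? (x :: t).length ((pvFm x t).1 : Int)
            = some (pvFm x t).1 := by
          simp only [PySem.List.pyIdx?]
          rw [if_pos (by positivity), if_pos (by exact_mod_cast by simp; omega)]
          simp
        simp only [PySem.List.pop?, hidx, Option.bind_some]
        have hget : (x :: t)[(pvFm x t).1]? = some (pvFm x t).2 := by
          rw [List.getElem?_eq_getElem (by simp; omega)]
          have := pvFm_snd_getD x [] t
          simp [List.getD, List.getElem?_eq_getElem (by simp; omega : (pvFm x t).1 < (x :: t).length)] at this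
          simp [this]
        rw [hget]
        rfl
      split
      · rename_i hp
        rw [max2?_range_eq_fm, hpop] at hp
        exact absurd hp (by simp)
      · rename_i root rest hp
        rw [max2?_range_eq_fm, hpop] at hp
        have h := Option.some.inj hp
        have hroot : (pvFm x t).2 = root := congrArg Prod.fst h
        have hrest : (x :: t).eraseIdx (pvFm x t).1 = rest := congrArg Prod.snd h
        subst hroot
        subst hrest
        rw [pvSel_cons]
        simp only [pvAddRanks]
        congr 1
        exact ih _ (by
          simp only [List.length_eraseIdx, List.length_cons] at hn ⊢
          split <;> omega) _ _ rfl

-- ---- A side: the partition + two reverse sorts is the compound-key insertion sort ----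

theorem insertBy_congr (before b' : List (String × Int) → List (String × Int) → Bool)
    (x : List (String × Int)) :
    ∀ ys : List (List (String × Int)), (∀ y ∈ ys, before x y = b' x y) →
      PySem.List.insertBy before x ys = PySem.List.insertBy b' x ys := by
  intro ys
  induction ys with
  | nil => intro _; rfl
  | cons y t ih =>
      intro h
      rw [insertBy_cons, insertBy_cons, h y (by simp)]
      by_cases hb : b' x y = true
      · simp [hb]
      · simp only [Bool.not_eq_true] at hb
        simp [hb, ih (fun z hz => h z (by simp [hz]))]

theorem insertBy_append_of_forall_true (before : List (String × Int) → List (String × Int) → Bool)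
    (x : List (String × Int)) (A B : List (List (String × Int)))
    (h : ∀ y ∈ B, before x y = true) :
    PySem.List.insertBy before x (A ++ B) = PySem.List.insertBy before x A ++ B := by
  induction A with
  | nil =>
      cases B with
      | nil => rfl
      | cons b t => simp [insertBy_cons, insertBy_nil, h b (by simp)]
  | cons a t ih =>
      rw [List.cons_append, insertBy_cons, insertBy_cons]
      by_cases hb : before x a = true
      · simp [hb]
      · simp only [Bool.not_eq_true] at hb
        simp [hb, ih]

theorem insertBy_append_of_forall_false (before : List (String × Int) → List (String × Int) → Bool)
    (x : List (String × Int)) (A B : List (List (String × Int)))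
    (h : ∀ y ∈ A, before x y = false) :
    PySem.List.insertBy before x (A ++ B) = A ++ PySem.List.insertBy before x B := by
  induction A with
  | nil => rfl
  | cons a t ih =>
      rw [List.cons_append, insertBy_cons, h a (by simp)]
      simp [ih (fun z hz => h z (by simp [hz]))]

-- the stable compound-key sort splits into the two partition sorts
theorem sorted2_split (p : List (String × Int) → Bool) (k2 : List (String × Int) → Int)
    (xs : List (List (String × Int))) :
    PySem.List.sorted2 xs (fun x => if p x then (1 : Int) else 0) k2 true
      = PySem.List.sorted (xs.filter p) k2 true
        ++ PySem.List.sorted (xs.filter (fun x => !p x)) k2 true := by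
  induction xs using List.reverseRecOn with
  | nil => rfl
  | append_singleton xs x ih =>
      have h2 : PySem.List.sorted2 (xs ++ [x]) (fun x => if p x then (1 : Int) else 0) k2 true
          = PySem.List.insertBy
              (fun a b => decide ((if p b then (1:Int) else 0) < (if p a then (1:Int) else 0)) ||
                (!decide ((if p a then (1:Int) else 0) < (if p b then (1:Int) else 0)) &&
                  decide (k2 b < k2 a)))
              x (PySem.List.sorted2 xs (fun x => if p x then (1 : Int) else 0) k2 true) := by
        simp [PySem.List.sorted2, List.foldl_append]
      have h1 : ∀ ys : List (List (String × Int)), PySem.List.sorted (ys ++ [x]) k2 true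
          = PySem.List.insertBy (fun a b => decide (k2 b < k2 a)) x
              (PySem.List.sorted ys k2 true) := by
        intro ys
        rw [PySem.List.sorted_rev_eq_foldl_insertBy, PySem.List.sorted_rev_eq_foldl_insertBy,
          List.foldl_append]
        rfl
      cases hp : p x with
      | true =>
          have hfilt : (xs ++ [x]).filter p = xs.filter p ++ [x] := by simp [hp]
          have hfilt' : (xs ++ [x]).filter (fun x => !p x) = xs.filter (fun x => !p x) := by
            simp [hp]
          rw [h2, ih, hfilt, hfilt', h1,
            insertBy_append_of_forall_true _ x _ _ (by
              intro y hy
              have : p y = false := by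
                have := (PySem.List.mem_sorted _ _ _ _).1 hy
                simpa using (List.mem_filter.1 this).2
              simp [this, hp]),
            insertBy_congr _ (fun a b => decide (k2 b < k2 a)) x _ (by
              intro y hy
              have : p y = true := by
                have := (PySem.List.mem_sorted _ _ _ _).1 hy
                simpa using (List.mem_filter.1 this).2
              simp [this, hp])]
      | false =>
          have hfilt : (xs ++ [x]).filter p = xs.filter p := by simp [hp]
          have hfilt' : (xs ++ [x]).filter (fun x => !p x)
              = xs.filter (fun x => !p x) ++ [x] := by simp [hp]
          rw [h2, ih, hfilt, hfilt', h1,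
            insertBy_append_of_forall_false _ x _ _ (by
              intro y hy
              have : p y = true := by
                have := (PySem.List.mem_sorted _ _ _ _).1 hy
                simpa using (List.mem_filter.1 this).2
              simp [this, hp]),
            insertBy_congr _ (fun a b => decide (k2 b < k2 a)) x _ (by
              intro y hy
              have : p y = false := by
                have := (PySem.List.mem_sorted _ _ _ _).1 hy
                simpa using (List.mem_filter.1 this).2
              simp [this, hp])]

-- the compound sort is the pvGt insertion foldl (definitional)
theorem sorted2_eq_pvIns (xs : List (List (String × Int))) :
    PySem.List.sorted2 xs (fun x => if pvGetKey x "is_design_specific" != 0 then (1 : Int) else 0)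
      (fun x => pvGetKey x "total_search_volume") true = pvIns xs := by
  simp only [PySem.List.sorted2, pvIns]
  congr 1
  funext acc x
  congr 1
  funext a b
  simp only [pvGt, pvK1, pvK2, bne]
  by_cases ha : pvGetKey a "is_design_specific" = 0 <;>
    by_cases hb : pvGetKey b "is_design_specific" = 0 <;>
      simp [ha, hb]

-- ===== VERDICT (by name: the statement is the Claim_ definition above) =====
theorem rank_roots_py_spec : Claim_equal_rank_roots_py := by
  intro root_stats _ _
  unfold Spec_rank_roots_py rank_roots_py rank_roots_py_alt
  show pvAddRanks 1
      (PySem.List.sorted (root_stats.filter (fun r => pvGetKey r "is_design_specific" != 0))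
          (fun x => pvGetKey x "total_search_volume") true
        ++ PySem.List.sorted (root_stats.filter (fun r => pvGetKey r "is_design_specific" == 0))
          (fun x => pvGetKey x "total_search_volume") true)
      = pvSelLoop 1 root_stats
  have hq : (fun r : List (String × Int) => pvGetKey r "is_design_specific" == 0)
      = (fun r : List (String × Int) => !(pvGetKey r "is_design_specific" != 0)) := by
    funext r; simp [bne]
  rw [hq, ← sorted2_split, sorted2_eq_pvIns,
    pvIns_eq_pvSel root_stats.length root_stats rfl,
    pvSelLoop_eq_addRanks root_stats.length root_stats 1 rfl]
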